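-- pv_equiv track=rewrite | github.com/onyourYujin/AlgorithmProblemSolving | sorting and searching/prog2_H Index.py | solution
-- ===== SOURCE A (Python) =====
-- def solution(citations):
--     n = len(citations)
--     while n > 0:
--         cnt = 0
--         for j in citations:
--             if n <= j:
--                 cnt+=1
--         if cnt == n:
--             return cnt
--         else:
--             n -= 1
-- ===== SOURCE B (Python) =====
-- def solution(citations):
--     s = sorted(citations, reverse=True)
--     m = len(s)
--     c = 0
--     for n in range(m, 0, -1):
--         while c < m and s[c] >= n:
--             c += 1
--         if c == n:
--             return n
--     return None
-- ===== Notes on version B (the rewrite author's own statement) =====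
-- stated objective: faster
-- what changed: B sorts the citations once (descending) and does a single two-pointer sweep over candidate n from len down, maintaining the count of elements >= n incrementally, instead of A's full re-count of the list for every candidate n.
import Mathlib
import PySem

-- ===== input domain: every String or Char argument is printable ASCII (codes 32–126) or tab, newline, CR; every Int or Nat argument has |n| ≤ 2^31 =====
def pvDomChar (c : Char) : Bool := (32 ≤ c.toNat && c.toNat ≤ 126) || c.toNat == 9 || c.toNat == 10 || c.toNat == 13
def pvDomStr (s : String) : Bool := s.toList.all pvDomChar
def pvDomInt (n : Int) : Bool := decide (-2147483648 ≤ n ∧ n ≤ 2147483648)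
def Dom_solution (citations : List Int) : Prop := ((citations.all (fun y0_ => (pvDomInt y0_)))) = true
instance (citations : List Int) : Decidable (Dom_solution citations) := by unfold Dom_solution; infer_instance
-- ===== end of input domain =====

-- B sorts once and sweeps with a moving count; A re-counts the whole list for each candidate n.

-- ===== PORT A =====
-- cnt = 0; for j in citations: if n <= j: cnt += 1
def solutionCnt (citations : List Int) (n : Nat) : Int :=
  citations.foldl (fun cnt j => if (n : Int) ≤ j then cnt + 1 else cnt) 0

-- while n > 0: … ; n -= 1   (n starts at len(citations), so it is a countdown on a Nat)
def solutionLoop (citations : List Int) : Nat → Option Int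
  | 0 => none
  | n + 1 =>
    let cnt := solutionCnt citations (n + 1)
    if cnt = ((n : Int) + 1) then some cnt else solutionLoop citations n

def solution (citations : List Int) : Option Int :=
  solutionLoop citations citations.length

-- ===== PORT B =====
-- while c < m and s[c] >= n: c += 1   (fuel = m - c bounds the while; s[c]? = none iff c ≥ m)
def altAdv (s : List Int) (n : Int) : Nat → Nat → Nat
  | c, 0 => c
  | c, fuel + 1 =>
    match s[c]? with
    | some v => if n ≤ v then altAdv s n (c + 1) fuel else c
    | none => c

-- for n in range(m, 0, -1): …; return None
def altLoop (s : List Int) : Nat → Nat → Option Int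
  | 0, _ => none
  | n + 1, c =>
    let c' := altAdv s ((n : Int) + 1) c s.length
    if c' = n + 1 then some ((n : Int) + 1) else altLoop s n c'

def solution_alt (citations : List Int) : Option Int :=
  let s := PySem.List.sorted citations (fun x => x) true
  altLoop s s.length 0

-- ===== PRECONDITION & SPEC =====
def Spec_solution (citations : List Int) (out : Option Int) : Prop := out = solution_alt citations
instance (citations : List Int) (out : Option Int) : Decidable (Spec_solution citations out) := by unfold Spec_solution; infer_instance

-- ===== CLAIM (what is proved, stated in full; the proofs are below) =====
def Claim_equal_solution : Prop := ∀ (citations : List Int), Dom_solution citations → Spec_solution citations (solution citations)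

-- ===== LEMMAS AND PROOFS =====

-- A's inner count is a countP
theorem solutionCnt_aux (p : Int → Bool) (l : List Int) (a : Int) :
    l.foldl (fun cnt j => if p j then cnt + 1 else cnt) a = a + (l.countP p : Int) := by
  induction l generalizing a with
  | nil => simp
  | cons x t ih =>
    simp only [List.foldl_cons, List.countP_cons, ih]
    by_cases h : p x
    · simp [h]; omega
    · simp [h]

theorem solutionCnt_eq_countP (citations : List Int) (n : Nat) :
    solutionCnt citations n = (citations.countP (fun j => decide ((n : Int) ≤ j)) : Int) := by
  have := solutionCnt_aux (fun j => decide ((n : Int) ≤ j)) citations 0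
  simpa [solutionCnt] using this

-- altAdv reaches c + length of the satisfying prefix of (s.drop c)
theorem altAdv_eq (s : List Int) (n : Int) (fuel c : Nat) (hf : s.length - c ≤ fuel) :
    altAdv s n c fuel = c + ((s.drop c).takeWhile (fun v => decide (n ≤ v))).length := by
  induction fuel generalizing c with
  | zero =>
    have : s.length ≤ c := by omega
    simp [altAdv, List.drop_eq_nil_of_le this]
  | succ f ih =>
    by_cases hc : c < s.length
    · have hget : s[c]? = some s[c] := List.getElem?_eq_getElem hc
      have hdrop : s.drop c = s[c] :: s.drop (c + 1) := List.drop_eq_getElem_cons hc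
      by_cases hn : n ≤ s[c]
      · rw [altAdv, hget]
        simp only []
        rw [if_pos hn, ih (c + 1) (by omega), hdrop, List.takeWhile_cons]
        simp [hn]
        omega
      · rw [altAdv, hget]
        simp only []
        rw [if_neg hn, hdrop, List.takeWhile_cons]
        simp [hn]
    · have hg : s[c]? = none := by rw [List.getElem?_eq_none]; omega
      rw [altAdv, hg]
      simp [List.drop_eq_nil_of_le (by omega : s.length ≤ c)]

-- on a descending-sorted list, countP of (k ≤ ·) is the takeWhile prefix length,
-- and more generally any c ≤ countP splits off
theorem countP_split (k : Int) (s : List Int) (hs : s.Pairwise (fun a b => b ≤ a)) (c : Nat)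
    (hc : c ≤ s.countP (fun v => decide (k ≤ v))) :
    c + ((s.drop c).takeWhile (fun v => decide (k ≤ v))).length
      = s.countP (fun v => decide (k ≤ v)) := by
  induction s generalizing c with
  | nil => simp at hc; simp [hc]
  | cons a t ih =>
    rcases List.pairwise_cons.mp hs with ⟨hab, ht⟩
    by_cases hk : k ≤ a
    · have hcnt : (a :: t).countP (fun v => decide (k ≤ v))
          = t.countP (fun v => decide (k ≤ v)) + 1 := by
        simp [hk]
      cases c with
      | zero =>
        simp only [List.drop_zero, Nat.zero_add, List.takeWhile_cons, hcnt]
        simp only [hk, decide_true, if_true]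
        have := ih ht 0 (by omega)
        simp at this
        simp [List.length_cons]
        omega
      | succ c =>
        have := ih ht c (by omega)
        simp only [List.drop_succ_cons, hcnt]
        omega
    · -- head fails, so every element fails (descending)
      have hz : (a :: t).countP (fun v => decide (k ≤ v)) = 0 := by
        apply List.countP_eq_zero.mpr
        intro x hx
        rcases List.mem_cons.mp hx with rfl | hxt
        · simpa using hk
        · have : x ≤ a := hab x hxt
          simp; omega
      rw [hz] at hc
      interval_cases c
      simp only [List.drop_zero, List.takeWhile_cons]
      simp [hz, hk]

-- main loop correspondence
theorem loop_eq (citations s : List Int) (hperm : s.Perm citations)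
    (hs : s.Pairwise (fun a b => b ≤ a)) (n : Nat) (c : Nat)
    (hc : c ≤ s.countP (fun v => decide ((n : Int) ≤ v))) :
    solutionLoop citations n = altLoop s n c := by
  induction n generalizing c with
  | zero => simp [solutionLoop, altLoop]
  | succ n ih =>
    have hadv : altAdv s ((n : Int) + 1) c s.length
        = s.countP (fun v => decide ((n : Int) + 1 ≤ v)) := by
      have h1 := altAdv_eq s ((n : Int) + 1) s.length c (by omega)
      have h2 := countP_split ((n : Int) + 1) s hs c (by
        have : (((n : Nat) + 1 : Nat) : Int) = (n : Int) + 1 := by push_cast; ring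
        rw [this] at hc; exact hc)
      omega
    have hcntA : solutionCnt citations (n + 1)
        = (s.countP (fun v => decide ((n : Int) + 1 ≤ v)) : Int) := by
      rw [solutionCnt_eq_countP, hperm.countP_eq]
      push_cast
      ring_nf
    rw [solutionLoop, altLoop]
    simp only [hadv, hcntA]
    by_cases heq : s.countP (fun v => decide ((n : Int) + 1 ≤ v)) = n + 1
    · rw [heq]; norm_num
    · have hne : ¬((s.countP (fun v => decide ((n : Int) + 1 ≤ v)) : Int) = (n : Int) + 1) := by
        omega
      rw [if_neg hne, if_neg heq]
      apply ih
      calc s.countP (fun v => decide ((n : Int) + 1 ≤ v))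
          ≤ s.countP (fun v => decide ((n : Int) ≤ v)) := by
            apply List.countP_mono_left; intro x _ hx; simp at hx ⊢; omega

-- ===== VERDICT (by name: the statement is the Claim_ definition above) =====
theorem solution_spec : Claim_equal_solution := by
  intro citations _
  unfold Spec_solution solution solution_alt
  have hperm := PySem.List.sorted_perm citations (fun x => x) true
  have hs := PySem.List.sorted_pairwise_rev citations (fun x => x)
  have hlen : (PySem.List.sorted citations (fun x => x) true).length = citations.length :=
    hperm.length_eq
  rw [← hlen]
  exact loop_eq citations _ hperm hs _ 0 (Nat.zero_le _)
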